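-- pv_equiv track=rewrite | github.com/richo/groundstation | groundstation/audio_announcer.py | pack_ascii_to_bitstream
-- ===== SOURCE A (Python) =====
-- def pack_ascii_to_bitstream(payload):
--     # Assume header data
--     # Take the encoded ints, walk along them MSB -> LSB, converting to bits
--     out = []
--     for c in payload:
--         for bit in range(8, 0, -1):
--             bit -= 1
--             value = ord(c) & (1<<bit)
--             out.append(1 if value else 0)
--     return out
-- ===== SOURCE B (Python) =====
-- def pack_ascii_to_bitstream(payload):
--     # Format each byte as an 8-char MSB-first binary string and emit its digits.
--     return [int(bit) for c in payload for bit in format(ord(c) & 0xFF, '08b')]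
-- ===== Notes on version B (the rewrite author's own statement) =====
-- stated objective: idiomatic
-- what changed: B replaces the per-bit mask-and-test inner loop with binary string formatting of each byte (format(ord(c) & 0xFF, '08b')) inside a flat comprehension.
import Mathlib
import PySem

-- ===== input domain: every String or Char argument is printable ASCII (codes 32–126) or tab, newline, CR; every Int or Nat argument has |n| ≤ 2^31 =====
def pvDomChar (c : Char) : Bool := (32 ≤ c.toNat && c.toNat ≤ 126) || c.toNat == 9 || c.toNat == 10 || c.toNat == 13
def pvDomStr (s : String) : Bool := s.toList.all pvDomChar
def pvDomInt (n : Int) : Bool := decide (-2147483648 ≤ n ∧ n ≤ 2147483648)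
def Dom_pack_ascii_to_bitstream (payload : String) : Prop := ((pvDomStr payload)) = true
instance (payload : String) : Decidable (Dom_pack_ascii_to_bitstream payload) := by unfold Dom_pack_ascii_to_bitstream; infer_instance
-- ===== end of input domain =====

-- B emits each byte's bits by formatting it as an 8-char MSB-first binary string (idiomatic); same result, same cost.

-- ===== PORT A =====
-- for c in payload: for bit in range(8,0,-1): bit -= 1; value = ord(c) & (1<<bit); out.append(1 if value else 0)
-- (ord(c) and 1<<bit are nonnegative, so the Python int '&' is computed exactly in Nat)
def pack_ascii_to_bitstream (payload : String) : List Int :=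
  payload.toList.foldl (fun out c =>
    (PySem.List.pyRange 8 0 (-1)).foldl (fun out bit =>
      let bit : Int := bit - 1
      let value : Nat := c.toNat &&& (1 <<< bit.toNat)
      out ++ [if value ≠ 0 then 1 else 0]) out) []

-- ===== PORT B =====
-- binary digits of n, MSB first: Python's format(n, 'b') for n > 0 (the n = 0 case is covered by the pad below)
def pvBinChars : Nat → List Char
  | 0 => []
  | (n+1) => pvBinChars ((n+1) / 2) ++ [if (n+1) % 2 = 1 then '1' else '0']
decreasing_by exact Nat.div_lt_self (Nat.succ_pos n) (by norm_num)

-- format(n, '08b'): zero-pad on the left to width 8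
def pvFormat08b (n : Nat) : List Char :=
  List.replicate (8 - (pvBinChars n).length) '0' ++ pvBinChars n

-- [int(bit) for c in payload for bit in format(ord(c) & 0xFF, '08b')]
def pack_ascii_to_bitstream_alt (payload : String) : List Int :=
  payload.toList.flatMap (fun c =>
    (pvFormat08b (c.toNat &&& 0xFF)).map (fun b => if b = '1' then (1 : Int) else 0))

-- ===== PRECONDITION & SPEC =====
def Spec_pack_ascii_to_bitstream (payload : String) (out : List Int) : Prop := out = pack_ascii_to_bitstream_alt payload
instance (payload : String) (out : List Int) : Decidable (Spec_pack_ascii_to_bitstream payload out) := by unfold Spec_pack_ascii_to_bitstream; infer_instance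

-- ===== CLAIM (what is proved, stated in full; the proofs are below) =====
def Claim_equal_pack_ascii_to_bitstream : Prop := ∀ (payload : String), Dom_pack_ascii_to_bitstream payload → Spec_pack_ascii_to_bitstream payload (pack_ascii_to_bitstream payload)

-- ===== LEMMAS AND PROOFS =====

-- A's 8 bits for one char of code n (the inner loop, started from [])
def pvABits (n : Nat) : List Int :=
  (PySem.List.pyRange 8 0 (-1)).foldl (fun out bit =>
    let bit : Int := bit - 1
    let value : Nat := n &&& (1 <<< bit.toNat)
    out ++ [if value ≠ 0 then 1 else 0]) []

lemma pvABits_append (n : Nat) (acc : List Int) :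
    (PySem.List.pyRange 8 0 (-1)).foldl (fun out bit =>
      let bit : Int := bit - 1
      let value : Nat := n &&& (1 <<< bit.toNat)
      out ++ [if value ≠ 0 then 1 else 0]) acc = acc ++ pvABits n := by
  simp [pvABits]

lemma pvA_eq_flatMap (l : List Char) (acc : List Int) :
    l.foldl (fun out c =>
      (PySem.List.pyRange 8 0 (-1)).foldl (fun out bit =>
        let bit : Int := bit - 1
        let value : Nat := c.toNat &&& (1 <<< bit.toNat)
        out ++ [if value ≠ 0 then 1 else 0]) out) acc
    = acc ++ l.flatMap (fun c => pvABits c.toNat) := by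
  induction l generalizing acc with
  | nil => simp
  | cons c t ih =>
    rw [List.foldl_cons, pvABits_append, ih, List.flatMap_cons, List.append_assoc]

lemma pvBitEq (n k m : Nat) (hm : 2 ^ k = m) :
    (if n &&& m = 0 then (0 : Int) else 1) = if n.testBit k then 1 else 0 := by
  subst hm
  rw [Nat.and_two_pow]
  cases h : n.testBit k <;> simp

lemma pvABits_eq (n : Nat) :
    pvABits n = ((List.range 8).map (fun k => if n.testBit k then (1 : Int) else 0)).reverse := by
  have hr : PySem.List.pyRange 8 0 (-1) = [8, 7, 6, 5, 4, 3, 2, 1] := by decide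
  simp [pvABits, hr, List.foldl, List.range_succ]
  refine ⟨?_, ?_, ?_, ?_, ?_, ?_, ?_, ?_⟩
  · exact pvBitEq n 7 128 (by norm_num)
  · exact pvBitEq n 6 64 (by norm_num)
  · exact pvBitEq n 5 32 (by norm_num)
  · exact pvBitEq n 4 16 (by norm_num)
  · exact pvBitEq n 3 8 (by norm_num)
  · exact pvBitEq n 2 4 (by norm_num)
  · exact pvBitEq n 1 2 (by norm_num)
  · have := pvBitEq n 0 1 (by norm_num)
    rw [Nat.testBit_zero] at this
    rcases Nat.mod_two_eq_zero_or_one n with h | h <;> simp_all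

-- the Int digits of pvBinChars
def pvBinDigits : Nat → List Int
  | 0 => []
  | (n+1) => pvBinDigits ((n+1) / 2) ++ [if (n+1) % 2 = 1 then 1 else 0]
decreasing_by exact Nat.div_lt_self (Nat.succ_pos n) (by norm_num)

lemma pvMap_binChars (n : Nat) :
    (pvBinChars n).map (fun b => if b = '1' then (1 : Int) else 0) = pvBinDigits n := by
  induction n using pvBinChars.induct with
  | case1 => simp [pvBinChars, pvBinDigits]
  | case2 n ih =>
    rw [pvBinChars, pvBinDigits, List.map_append, ih]
    split_ifs <;> simp

lemma pvLen_binChars (n : Nat) : (pvBinChars n).length = (pvBinDigits n).length := by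
  rw [← pvMap_binChars, List.length_map]

lemma pvPad (w : Nat) : ∀ n : Nat, n < 2 ^ w →
    (pvBinDigits n).reverse ++ List.replicate (w - (pvBinDigits n).length) 0
      = (List.range w).map (fun k => if n.testBit k then (1 : Int) else 0) := by
  induction w with
  | zero =>
    intro n hn
    interval_cases n
    simp [pvBinDigits]
  | succ w ih =>
    intro n hn
    rw [List.range_succ_eq_map, List.map_cons, List.map_map]
    have htail : (List.range w).map ((fun k => if n.testBit k then (1 : Int) else 0) ∘ Nat.succ)
        = (List.range w).map (fun k => if (n / 2).testBit k then (1 : Int) else 0) := by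
      apply List.map_congr_left
      intro k _
      simp [Function.comp, Nat.testBit_add_one]
    rw [htail]
    have hdiv : n / 2 < 2 ^ w := by
      have : n < 2 ^ w * 2 := by rw [← pow_succ]; exact hn
      omega
    rw [← ih (n / 2) hdiv]
    match n with
    | 0 =>
      simp [pvBinDigits, Nat.testBit_zero, List.replicate_succ]
    | (m+1) =>
      rw [pvBinDigits, List.reverse_append, List.reverse_singleton, List.singleton_append]
      have hbit : (if (m+1) % 2 = 1 then (1 : Int) else 0) = if (m+1).testBit 0 then 1 else 0 := by
        rw [Nat.testBit_zero]
        rcases Nat.mod_two_eq_zero_or_one (m+1) with h | h <;> simp [h]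
      rw [hbit]
      simp [Nat.succ_sub_succ_eq_sub]

lemma pvPerChar (n : Nat) (h : n < 256) :
    pvABits n = (pvFormat08b (n &&& 0xFF)).map (fun b => if b = '1' then (1 : Int) else 0) := by
  have hmask : n &&& 0xFF = n := by
    have := Nat.and_two_pow_sub_one_eq_mod n 8
    simpa [Nat.mod_eq_of_lt h] using this
  have h8 : n < 2 ^ 8 := by norm_num; exact h
  rw [hmask, pvABits_eq, pvFormat08b, List.map_append, List.map_replicate, pvMap_binChars,
      pvLen_binChars]
  have h0 : ((if ('0' : Char) = '1' then (1 : Int) else 0)) = 0 := by decide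
  rw [h0, ← pvPad 8 n h8]
  simp

lemma pvMain (l : List Char) (hd : l.all pvDomChar = true) :
    l.flatMap (fun c => pvABits c.toNat)
      = l.flatMap (fun c => (pvFormat08b (c.toNat &&& 0xFF)).map (fun b => if b = '1' then (1 : Int) else 0)) := by
  induction l with
  | nil => rfl
  | cons c t ih =>
    simp only [List.all_cons, Bool.and_eq_true] at hd
    have hc : c.toNat < 256 := by
      have := hd.1
      simp [pvDomChar] at this
      omega
    simp only [List.flatMap_cons, ih hd.2, pvPerChar c.toNat hc]

-- ===== VERDICT (by name: the statement is the Claim_ definition above) =====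
theorem pack_ascii_to_bitstream_spec : Claim_equal_pack_ascii_to_bitstream := by
  intro payload hdom
  unfold Spec_pack_ascii_to_bitstream pack_ascii_to_bitstream pack_ascii_to_bitstream_alt
  rw [pvA_eq_flatMap, List.nil_append]
  exact pvMain payload.toList hdom
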